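-- pv_equiv track=rewrite | github.com/JaehyoJJAng/Algorithm | algorithm/goorm/cos-pro-2/30_상품권 총 지급액 구하기.py | solution
-- ===== SOURCE A (Python) =====
-- from typing import List
--
-- def solution(purchase: List[int]) -> int:
--     total : int = 0
--
--     for p in purchase:
--         if p >= 1000000:
--             total += 50000
--         elif p >= 600000:
--             total += 30000
--         elif p >= 400000:
--             total += 20000
--         elif p >= 200000:
--             total += 10000
--
--     return total
-- ===== SOURCE B (Python) =====
-- def solution(purchase):
--     # Each tier adds an incremental bonus on top of the lower tier, so the
--     # total equals the weighted sum of "how many purchases reach threshold t".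
--     increments = [(200000, 10000), (400000, 10000), (600000, 10000), (1000000, 20000)]
--     return sum(w * sum(1 for p in purchase if p >= t) for t, w in increments)
-- ===== Notes on version B (the rewrite author's own statement) =====
-- stated objective: alternative
-- what changed: Instead of A's single pass assigning each purchase its full reward via an if/elif cascade, B decomposes rewards into per-threshold increments and computes the total as a weighted sum of four threshold counts (one counting pass per threshold), with no per-element reward computed anywhere.
import Mathlib
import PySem

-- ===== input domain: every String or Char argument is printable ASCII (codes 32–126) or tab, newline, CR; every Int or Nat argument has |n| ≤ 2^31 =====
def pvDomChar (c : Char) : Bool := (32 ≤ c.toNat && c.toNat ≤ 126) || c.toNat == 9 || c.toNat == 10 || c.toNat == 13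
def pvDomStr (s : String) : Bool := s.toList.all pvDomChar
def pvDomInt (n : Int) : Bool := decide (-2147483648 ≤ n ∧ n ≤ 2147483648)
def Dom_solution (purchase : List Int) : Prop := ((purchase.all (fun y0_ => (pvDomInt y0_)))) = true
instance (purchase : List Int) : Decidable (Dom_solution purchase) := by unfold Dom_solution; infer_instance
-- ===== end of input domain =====

-- B replaces A's per-element if/elif reward cascade with a weighted sum of four
-- threshold counts (incremental-reward decomposition); same O(n) cost, different algorithm.

-- ===== PORT A =====
def solution (purchase : List Int) : Int :=
  purchase.foldl (fun total p =>
    if p ≥ 1000000 then total + 50000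
    else if p ≥ 600000 then total + 30000
    else if p ≥ 400000 then total + 20000
    else if p ≥ 200000 then total + 10000
    else total) 0

-- ===== PORT B =====
def pvIncrements : List (Int × Int) :=
  [(200000, 10000), (400000, 10000), (600000, 10000), (1000000, 20000)]

def solution_alt (purchase : List Int) : Int :=
  (pvIncrements.map (fun tw =>
    tw.2 * ((purchase.countP (fun p => tw.1 ≤ p) : Nat) : Int))).sum

-- ===== PRECONDITION & SPEC =====
def Spec_solution (purchase : List Int) (out : Int) : Prop := out = solution_alt purchase
instance (purchase : List Int) (out : Int) : Decidable (Spec_solution purchase out) := by unfold Spec_solution; infer_instance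

-- ===== CLAIM (what is proved, stated in full; the proofs are below) =====
def Claim_equal_solution : Prop := ∀ (purchase : List Int), Dom_solution purchase → Spec_solution purchase (solution purchase)

-- ===== LEMMAS AND PROOFS =====

set_option maxHeartbeats 1000000 in
theorem foldA_eq (purchase : List Int) (acc : Int) :
    purchase.foldl (fun total p =>
      if p ≥ 1000000 then total + 50000
      else if p ≥ 600000 then total + 30000
      else if p ≥ 400000 then total + 20000
      else if p ≥ 200000 then total + 10000
      else total) acc =
    acc + 10000 * ((purchase.countP (fun p => (200000:Int) ≤ p) : Nat) : Int)
        + 10000 * ((purchase.countP (fun p => (400000:Int) ≤ p) : Nat) : Int)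
        + 10000 * ((purchase.countP (fun p => (600000:Int) ≤ p) : Nat) : Int)
        + 20000 * ((purchase.countP (fun p => (1000000:Int) ≤ p) : Nat) : Int) := by
  induction purchase generalizing acc with
  | nil => simp
  | cons p ps ih =>
    simp only [List.foldl_cons, ih, List.countP_cons]
    by_cases h1 : (1000000:Int) ≤ p <;> by_cases h2 : (600000:Int) ≤ p <;>
      by_cases h3 : (400000:Int) ≤ p <;> by_cases h4 : (200000:Int) ≤ p <;>
      simp [h1, h2, h3, h4] <;> omega

-- ===== VERDICT (by name: the statement is the Claim_ definition above) =====
theorem solution_spec : Claim_equal_solution := by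
  intro purchase _
  unfold Spec_solution solution solution_alt pvIncrements
  simp only [List.map_cons, List.map_nil, List.sum_cons, List.sum_nil]
  rw [foldA_eq]
  ring
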